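-- pv_equiv track=rewrite | github.com/calenwu/marl | ippo_algorithm_belief_catmouse/main.py | generate_action_space
-- ===== SOURCE A (Python) =====
-- def generate_action_space(n_actions, n_agents, l):
-- 	if n_agents == 0:
-- 		return l
-- 	len_l = len(l)
-- 	for li in range(len_l):
-- 		temp = l.pop(0)
-- 		for i in range(n_actions):
-- 			l.append(temp.copy() + [i])
-- 	l = generate_action_space(n_actions, n_agents-1, l)
-- 	return l
-- ===== SOURCE B (Python) =====
-- def generate_action_space(n_actions, n_agents, l):
-- 	if n_agents == 0 or not l:
-- 		return l
-- 	combos = [[]]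
-- 	for _ in range(n_agents):
-- 		combos = [p + [i] for p in combos for i in range(n_actions)]
-- 	l[:] = [x + p for x in l for p in combos]
-- 	return l
-- ===== Notes on version B (the rewrite author's own statement) =====
-- stated objective: simpler
-- what changed: Replaces A's recursion with pop-from-front/append-at-back queue rotation by a direct build: iteratively construct the full digit-tuple list (cartesian product) with comprehensions, then write all combinations back in one comprehension, keeping A's in-place mutation and returned-object semantics; Pre_ excludes negative n_agents (unbounded recursion) and n_agents past CPython's default recursion limit (RecursionError; under a raised limit a few of these still return, see cites).
-- outside the precondition, e.g. on generate_action_space(2, 1500, []): A returns [], B returns []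
import Mathlib
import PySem

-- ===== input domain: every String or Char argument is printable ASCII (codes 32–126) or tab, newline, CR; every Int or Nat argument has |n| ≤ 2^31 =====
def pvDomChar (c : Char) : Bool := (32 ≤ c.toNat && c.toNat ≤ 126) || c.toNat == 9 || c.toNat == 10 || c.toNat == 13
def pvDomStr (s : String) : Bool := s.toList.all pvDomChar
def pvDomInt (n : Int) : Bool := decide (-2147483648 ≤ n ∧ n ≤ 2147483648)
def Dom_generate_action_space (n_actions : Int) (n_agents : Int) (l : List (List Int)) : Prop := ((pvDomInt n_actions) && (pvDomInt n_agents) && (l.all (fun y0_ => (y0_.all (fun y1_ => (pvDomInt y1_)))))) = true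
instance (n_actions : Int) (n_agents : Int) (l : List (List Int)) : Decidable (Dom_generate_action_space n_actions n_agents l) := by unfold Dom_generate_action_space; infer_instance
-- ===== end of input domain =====

-- B builds the digit-combination list directly with comprehensions instead of A's
-- recursion with pop-front/append-back queue rotation (objective: simpler).
-- Both A and B mutate l in place; the theorems below are about the RETURN value only.

-- ===== PORT A =====
-- one pass of A's `for li in range(len_l)` body: temp = l.pop(0); for i in range(n_actions): l.append(temp.copy() + [i])
-- (the [] branch of the match is unreachable: the list always holds ≥ len_l - li original elements)
def pvStepA (n_actions : Int) (s : List (List Int)) : List (List Int) :=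
  match s with
  | [] => []
  | temp :: rest => rest ++ (PySem.List.pyRange 0 n_actions 1).map (fun i => temp ++ [i])

-- A's recursion, counted down on n_agents (Python diverges for n_agents < 0, excluded by Pre_)
def pvGasA (n_actions : Int) : Nat → List (List Int) → List (List Int)
  | 0, l => l
  | k + 1, l =>
      let l' := (List.range l.length).foldl (fun s _ => pvStepA n_actions s) l
      pvGasA n_actions k l'

def generate_action_space (n_actions : Int) (n_agents : Int) (l : List (List Int)) : List (List Int) :=
  pvGasA n_actions n_agents.toNat l

-- ===== PORT B =====
def generate_action_space_alt (n_actions : Int) (n_agents : Int) (l : List (List Int)) : List (List Int) :=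
  if n_agents = 0 ∨ l = [] then l
  else
    let combos := (List.range n_agents.toNat).foldl
      (fun cs _ => cs.flatMap (fun p => (PySem.List.pyRange 0 n_actions 1).map (fun i => p ++ [i]))) [[]]
    l.flatMap (fun x => combos.map (fun p => x ++ p))

-- ===== PRECONDITION & SPEC =====
-- Pre_ excludes the inputs on which A raises instead of returning: n_agents < 0 (the recursion
-- decrements n_agents forever) and n_agents > 997, where A's n_agents-deep recursion exceeds
-- CPython's default recursion limit (1000) and raises RecursionError; under a raised limit some
-- of the latter still return (see claim.json cites), so that bound is the default interpreter's.
def Pre_generate_action_space (n_actions : Int) (n_agents : Int) (l : List (List Int)) : Prop :=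
  0 ≤ n_agents ∧ n_agents ≤ 997
instance (n_actions : Int) (n_agents : Int) (l : List (List Int)) : Decidable (Pre_generate_action_space n_actions n_agents l) := by unfold Pre_generate_action_space; infer_instance
def pvWitness_generate_action_space : Int × Int × List (List Int) := (2, 2, [[5]])

def Spec_generate_action_space (n_actions : Int) (n_agents : Int) (l : List (List Int)) (out : List (List Int)) : Prop := out = generate_action_space_alt n_actions n_agents l
instance (n_actions : Int) (n_agents : Int) (l : List (List Int)) (out : List (List Int)) : Decidable (Spec_generate_action_space n_actions n_agents l out) := by unfold Spec_generate_action_space; infer_instance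

-- ===== CLAIM (what is proved, stated in full; the proofs are below) =====
def Claim_equal_generate_action_space : Prop := ∀ (n_actions : Int) (n_agents : Int) (l : List (List Int)), Dom_generate_action_space n_actions n_agents l → Pre_generate_action_space n_actions n_agents l → Spec_generate_action_space n_actions n_agents l (generate_action_space n_actions n_agents l)

-- ===== LEMMAS AND PROOFS =====

-- a foldl over a list that ignores the elements is an iterate
theorem pv_foldl_iterate {α β : Type} (g : β → β) (xs : List α) (s : β) :
    xs.foldl (fun s _ => g s) s = g^[xs.length] s := by
  induction xs generalizing s with
  | nil => rfl
  | cons a xs ih => simp [List.foldl, ih, Function.iterate_succ_apply]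

-- iterating pvStepA over the initial length rotates the queue: every element is
-- replaced (in order) by its n_actions extensions
theorem pv_iter_step (n_actions : Int) (l acc : List (List Int)) :
    (pvStepA n_actions)^[l.length] (l ++ acc) =
      acc ++ l.flatMap (fun x => (PySem.List.pyRange 0 n_actions 1).map (fun i => x ++ [i])) := by
  induction l generalizing acc with
  | nil => simp
  | cons a l ih =>
      have h1 : pvStepA n_actions ((a :: l) ++ acc) =
          (l ++ acc) ++ (PySem.List.pyRange 0 n_actions 1).map (fun i => a ++ [i]) := by
        simp [pvStepA]
      rw [List.length_cons, Function.iterate_succ_apply, h1, List.append_assoc, ih]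
      simp [List.flatMap_cons]

-- one round of A = a flatMap expansion of the whole list
theorem pv_round_eq (n_actions : Int) (l : List (List Int)) :
    (List.range l.length).foldl (fun s _ => pvStepA n_actions s) l =
      l.flatMap (fun x => (PySem.List.pyRange 0 n_actions 1).map (fun i => x ++ [i])) := by
  have := pv_iter_step n_actions l []
  simp at this
  rw [pv_foldl_iterate, List.length_range, this]

-- B's combos after k rounds
def pvCombos (n_actions : Int) : Nat → List (List Int)
  | 0 => [[]]
  | k + 1 => (pvCombos n_actions k).flatMap
      (fun p => (PySem.List.pyRange 0 n_actions 1).map (fun i => p ++ [i]))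

theorem pv_combos_foldl (n_actions : Int) (k : Nat) :
    (List.range k).foldl
      (fun cs _ => cs.flatMap (fun p => (PySem.List.pyRange 0 n_actions 1).map (fun i => p ++ [i]))) [[]]
      = pvCombos n_actions k := by
  induction k with
  | zero => rfl
  | succ k ih => rw [List.range_succ, List.foldl_append, ih]; rfl

-- prepend-style characterization: the (k+1)-digit combos are, equivalently, a first
-- digit prepended to each k-digit combo (same lexicographic order)
theorem pv_combos_succ_left (n_actions : Int) (k : Nat) :
    pvCombos n_actions (k + 1) =
      (PySem.List.pyRange 0 n_actions 1).flatMap (fun i => (pvCombos n_actions k).map (fun p => i :: p)) := by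
  induction k with
  | zero =>
      simp only [pvCombos, List.flatMap_singleton, List.nil_append]
      induction PySem.List.pyRange 0 n_actions 1 with
      | nil => rfl
      | cons a r ihr => simp [List.flatMap_cons, ihr]
  | succ k ih =>
      have expand : pvCombos n_actions (k + 2) = (pvCombos n_actions (k+1)).flatMap
          (fun p => (PySem.List.pyRange 0 n_actions 1).map (fun i => p ++ [i])) := rfl
      rw [expand, ih, List.flatMap_assoc]
      refine List.flatMap_congr (fun i _ => ?_)
      have expand1 : pvCombos n_actions (k + 1) = (pvCombos n_actions k).flatMap
          (fun p => (PySem.List.pyRange 0 n_actions 1).map (fun j => p ++ [j])) := rfl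
      rw [List.flatMap_map, ← ih, expand1, List.map_flatMap]
      simp [List.map_map, Function.comp_def]

-- expanding each element by one digit, then by the k-digit combos, is the same as
-- expanding by the (k+1)-digit combos
theorem pv_combos_cons (n_actions : Int) (k : Nat) (x : List Int) :
    ((PySem.List.pyRange 0 n_actions 1).map (fun i => x ++ [i])).flatMap
        (fun y => (pvCombos n_actions k).map (fun p => y ++ p)) =
      (pvCombos n_actions (k + 1)).map (fun p => x ++ p) := by
  rw [pv_combos_succ_left]
  simp [List.flatMap_map, List.map_flatMap, List.map_map, Function.comp_def]

-- A's k rounds = one flatMap by the k-digit combos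
theorem pv_gas_eq (n_actions : Int) (k : Nat) (l : List (List Int)) :
    pvGasA n_actions k l = l.flatMap (fun x => (pvCombos n_actions k).map (fun p => x ++ p)) := by
  induction k generalizing l with
  | zero => simp [pvGasA, pvCombos]
  | succ k ih =>
      rw [pvGasA, pv_round_eq, ih, List.flatMap_assoc]
      exact List.flatMap_congr (fun x _ => pv_combos_cons n_actions k x)

-- ===== VERDICT (by name: the statement is the Claim_ definition above) =====
theorem generate_action_space_spec : Claim_equal_generate_action_space := by
  intro n_actions n_agents l _ _
  unfold Spec_generate_action_space generate_action_space generate_action_space_alt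
  rw [pv_combos_foldl, pv_gas_eq]
  by_cases h : n_agents = 0 ∨ l = []
  · rcases h with h | h <;> simp [h, pvCombos]
  · simp [h]
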